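-- pv_equiv track=rewrite | github.com/zx21student019/servidor_general | servidor_david/examen/ejercicio2/ejercicio2.py | concatenaVocales
-- ===== SOURCE A (Python) =====
-- def concatenaVocales(lista):
--     texto = ""
--     contador = 0
--
--     for x in lista:
--         if x != " ":
--             contador += 1
--
--     if contador <= 5:
--         for letra in lista:
--             match letra:
--                 case "A":
--                     texto = texto +"A"
--                 case "E":
--                     texto = texto +"E"
--                 case "I":
--                     texto = texto +"I"
--                 case "O":
--                     texto = texto +"O"
--                 case "U":
--                     texto = texto +"U"
--                 case error:
--                     texto = "error"
--                     break
--     else: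
--         texto = "error"
--
--     return texto
-- ===== SOURCE B (Python) =====
-- def concatenaVocales(lista):
--     VOWELS = {"A", "E", "I", "O", "U"}
--     contador = 0
--     todas = True
--     texto = ""
--     for x in lista:
--         if x != " ":
--             contador += 1
--         if x in VOWELS:
--             texto += x
--         else:
--             todas = False
--     if contador > 5 or not todas:
--         return "error"
--     return texto
-- ===== Notes on version B (the rewrite author's own statement) =====
-- stated objective: simpler
-- what changed: A's two separate passes (count pass, then a vowel-concatenating pass with a break) are merged into one loop that simultaneously maintains the non-space counter, an 'all vowels' flag and the accumulated text, with a single final check.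
import Mathlib
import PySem

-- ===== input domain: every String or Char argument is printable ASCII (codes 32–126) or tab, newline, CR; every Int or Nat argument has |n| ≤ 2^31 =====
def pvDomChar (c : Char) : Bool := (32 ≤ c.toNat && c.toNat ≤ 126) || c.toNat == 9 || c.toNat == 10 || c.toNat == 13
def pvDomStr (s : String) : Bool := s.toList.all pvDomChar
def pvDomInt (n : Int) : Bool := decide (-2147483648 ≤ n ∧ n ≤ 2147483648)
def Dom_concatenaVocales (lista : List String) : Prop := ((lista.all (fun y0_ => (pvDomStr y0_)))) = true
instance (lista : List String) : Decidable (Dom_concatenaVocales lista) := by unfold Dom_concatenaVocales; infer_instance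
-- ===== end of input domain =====

-- B merges A's two passes into a single loop maintaining (counter, all-vowels flag, text); objective: simpler.

-- ===== PORT A =====
-- the second loop of A: append uppercase vowels; on any other element set "error" and break
def pvALoop : List String → String → String
  | [], texto => texto
  | letra :: rest, texto =>
    if letra = "A" then pvALoop rest (texto ++ "A")
    else if letra = "E" then pvALoop rest (texto ++ "E")
    else if letra = "I" then pvALoop rest (texto ++ "I")
    else if letra = "O" then pvALoop rest (texto ++ "O")
    else if letra = "U" then pvALoop rest (texto ++ "U")
    else "error"

def concatenaVocales (lista : List String) : String :=
  let contador : Int := lista.foldl (fun c x => if x ≠ " " then c + 1 else c) 0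
  if contador ≤ 5 then pvALoop lista "" else "error"

-- ===== PORT B =====
def pvIsVowel (x : String) : Bool :=
  x == "A" || x == "E" || x == "I" || x == "O" || x == "U"

-- B's single pass: state = (non-space counter, all-vowels flag, accumulated text)
def pvBLoop : List String → Int × Bool × String → Int × Bool × String
  | [], s => s
  | x :: rest, (c, f, t) =>
    let c' : Int := if x ≠ " " then c + 1 else c
    if pvIsVowel x then pvBLoop rest (c', f, t ++ x)
    else pvBLoop rest (c', false, t)

def concatenaVocales_alt (lista : List String) : String :=
  let s := pvBLoop lista (0, true, "")
  if 5 < s.1 ∨ s.2.1 = false then "error" else s.2.2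

-- ===== PRECONDITION & SPEC =====
def Spec_concatenaVocales (lista : List String) (out : String) : Prop := out = concatenaVocales_alt lista
instance (lista : List String) (out : String) : Decidable (Spec_concatenaVocales lista out) := by unfold Spec_concatenaVocales; infer_instance

-- ===== CLAIM (what is proved, stated in full; the proofs are below) =====
def Claim_equal_concatenaVocales : Prop := ∀ (lista : List String), Dom_concatenaVocales lista → Spec_concatenaVocales lista (concatenaVocales lista)

-- ===== LEMMAS AND PROOFS =====

-- concatenation of a list of strings (proof helper)
def pvJoin : List String → String
  | [] => ""
  | x :: xs => x ++ pvJoin xs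

theorem pvBLoop_fst (l : List String) (c : Int) (f : Bool) (t : String) :
    (pvBLoop l (c, f, t)).1 = l.foldl (fun c x => if x ≠ " " then c + 1 else c) c := by
  induction l generalizing c f t with
  | nil => rfl
  | cons x rest ih =>
    simp only [pvBLoop, List.foldl]
    split <;> rw [ih]

theorem pvBLoop_snd (l : List String) (c : Int) (f : Bool) (t : String) :
    (pvBLoop l (c, f, t)).2 = (f && l.all pvIsVowel, t ++ pvJoin (l.filter pvIsVowel)) := by
  induction l generalizing c f t with
  | nil => simp [pvBLoop, pvJoin]
  | cons x rest ih =>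
    simp only [pvBLoop, List.all_cons, List.filter_cons]
    by_cases hv : pvIsVowel x = true
    · simp [hv, ih, pvJoin, String.append_assoc]
    · simp [hv, ih, Bool.false_and]

theorem pvALoop_eq (l : List String) (t : String) :
    pvALoop l t = if l.all pvIsVowel then t ++ pvJoin l else "error" := by
  induction l generalizing t with
  | nil => simp [pvALoop, pvJoin]
  | cons x rest ih =>
    simp only [pvALoop, List.all_cons]
    by_cases hA : x = "A"
    · subst hA; simp [ih, pvIsVowel, pvJoin, String.append_assoc]
    · by_cases hE : x = "E"
      · subst hE; simp [ih, pvIsVowel, pvJoin, String.append_assoc]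
      · by_cases hI : x = "I"
        · subst hI; simp [ih, pvIsVowel, pvJoin, String.append_assoc]
        · by_cases hO : x = "O"
          · subst hO; simp [ih, pvIsVowel, pvJoin, String.append_assoc]
          · by_cases hU : x = "U"
            · subst hU; simp [ih, pvIsVowel, pvJoin, String.append_assoc]
            · have hv : pvIsVowel x = false := by
                simp [pvIsVowel, hA, hE, hI, hO, hU]
              simp [hA, hE, hI, hO, hU, hv]

-- ===== VERDICT (by name: the statement is the Claim_ definition above) =====
theorem concatenaVocales_spec : Claim_equal_concatenaVocales := by
  intro lista _
  unfold Spec_concatenaVocales concatenaVocales concatenaVocales_alt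
  dsimp only
  rw [pvALoop_eq]
  have h1 := pvBLoop_fst lista 0 true ""
  have h2 := pvBLoop_snd lista 0 true ""
  rcases hs : pvBLoop lista (0, true, "") with ⟨c, f, t⟩
  rw [hs] at h1 h2
  simp only at h1 h2
  simp only [Prod.mk.injEq, Bool.true_and] at h2
  obtain ⟨hf, ht⟩ := h2
  by_cases hall : lista.all pvIsVowel = true
  · have hfil : lista.filter pvIsVowel = lista := List.filter_eq_self.mpr (by
      intro a ha; exact List.all_eq_true.mp hall a ha)
    simp only [hall, if_true, hf, hfil, ht, String.empty_append, Bool.true_eq_false, or_false]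
    rw [h1]
    split_ifs with g1 g2 g3 <;> first | rfl | omega
  · have hf' : f = false := by rw [hf]; exact Bool.not_eq_true _ |>.mp hall
    simp [hall, hf']
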